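-- pv_equiv track=rewrite | github.com/danny-murray/Minesweeper_Simple | minesweeper_simple.py | construct_grid
-- ===== SOURCE A (Python) =====
-- def count_adjacent_mines(grid, row, column):
--     rows = len(grid)
--     columns = len(grid[0])
--     count = 0
--
--     for r in range(max(0, row - 1), min(rows, row + 2)):
--         for c in range(max(0, column - 1), min(columns, column + 2)):
--             if grid[r][c] == '#':
--                 count += 1
--     return count
--
-- def construct_grid(grid):
--     rows = len(grid)
--     columns = len(grid[0])
--     constructed_grid = [[None for _ in range(columns)] for _ in range(rows)]
--
--     for row in range(rows):
--         for column in range(columns):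
--             if grid[row][column] == '-':
--                 count = count_adjacent_mines(grid, row, column)
--                 constructed_grid[row][column] = str(count)
--             else:
--                 constructed_grid[row][column] = grid[row][column]
--
--     return constructed_grid
-- ===== SOURCE B (Python) =====
-- def construct_grid(grid):
--     cols = len(grid[0])
--     # 0/1 mine indicators, truncated to the first `cols` cells of each row
--     mines = [[1 if row[c] == '#' else 0 for c in range(cols)] for row in grid]
--     # horizontal sliding window of width 3 (zero-padded at the edges)
--     h = [[(m[c - 1] if c > 0 else 0) + m[c] + (m[c + 1] if c + 1 < cols else 0)
--           for c in range(cols)] for m in mines]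
--     zero = [0] * cols
--     result = []
--     for r, row in enumerate(grid):
--         above = h[r - 1] if r > 0 else zero
--         below = h[r + 1] if r + 1 < len(grid) else zero
--         hr = h[r]
--         result.append([str(above[c] + hr[c] + below[c]) if row[c] == '-' else row[c]
--                        for c in range(cols)])
--     return result
-- ===== Notes on version B (the rewrite author's own statement) =====
-- stated objective: alternative
-- what changed: B replaces the per-cell 3x3 neighborhood rescan with a separable two-pass scheme: one pass builds horizontal sliding-window sums of 0/1 mine indicators, and a second pass adds the three vertical neighbors of that table per cell.
import Mathlib
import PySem

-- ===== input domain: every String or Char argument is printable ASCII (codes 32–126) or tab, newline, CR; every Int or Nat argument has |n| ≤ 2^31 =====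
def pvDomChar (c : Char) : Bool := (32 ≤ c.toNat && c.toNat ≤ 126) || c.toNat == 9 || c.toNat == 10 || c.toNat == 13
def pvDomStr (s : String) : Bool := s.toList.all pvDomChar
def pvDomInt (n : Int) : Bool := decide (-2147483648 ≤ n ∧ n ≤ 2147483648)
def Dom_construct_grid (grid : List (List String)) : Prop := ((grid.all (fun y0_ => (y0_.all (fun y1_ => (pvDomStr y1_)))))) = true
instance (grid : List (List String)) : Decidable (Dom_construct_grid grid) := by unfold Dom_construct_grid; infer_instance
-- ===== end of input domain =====

-- B replaces A's per-cell 3x3 rescan with a separable two-pass scheme (horizontal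
-- sliding-window sums, then three vertical adds per cell); same values on Pre_.

-- ===== PORT A =====
-- grid[0] raises IndexError on an empty grid and grid[row][column] raises when a row is
-- shorter than len(grid[0]); Pre_construct_grid excludes exactly those inputs, so the
-- getD defaults below are never consulted on admitted inputs.
def count_adjacent_mines (grid : List (List String)) (row column : Int) : Int :=
  let rows : Int := PySem.List.len grid
  let columns : Int := PySem.List.len (grid.headD [])
  (PySem.List.pyRange (max 0 (row - 1)) (min rows (row + 2)) 1).foldl (fun count r =>
    (PySem.List.pyRange (max 0 (column - 1)) (min columns (column + 2)) 1).foldl (fun count c =>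
      if PySem.List.pyGetD (PySem.List.pyGetD grid r []) c "" = "#" then count + 1 else count)
      count) 0

def construct_grid (grid : List (List String)) : List (List String) :=
  let rows : Int := PySem.List.len grid
  let columns : Int := PySem.List.len (grid.headD [])
  (PySem.List.pyRange 0 rows 1).map (fun row =>
    (PySem.List.pyRange 0 columns 1).map (fun column =>
      if PySem.List.pyGetD (PySem.List.pyGetD grid row []) column "" = "-" then
        PySem.Int.toStr (count_adjacent_mines grid row column)
      else
        PySem.List.pyGetD (PySem.List.pyGetD grid row []) column ""))

-- ===== PORT B =====
def pvCols (grid : List (List String)) : Int := PySem.List.len (grid.headD [])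

def pvMines (grid : List (List String)) : List (List Int) :=
  grid.map (fun row =>
    (PySem.List.pyRange 0 (pvCols grid) 1).map (fun c =>
      if PySem.List.pyGetD row c "" = "#" then 1 else 0))

def pvH (grid : List (List String)) : List (List Int) :=
  (pvMines grid).map (fun m =>
    (PySem.List.pyRange 0 (pvCols grid) 1).map (fun c =>
      (if 0 < c then PySem.List.pyGetD m (c - 1) 0 else 0) +
        PySem.List.pyGetD m c 0 +
        (if c + 1 < pvCols grid then PySem.List.pyGetD m (c + 1) 0 else 0)))

def construct_grid_alt (grid : List (List String)) : List (List String) :=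
  let cols := pvCols grid
  let h := pvH grid
  let zero : List Int := List.replicate cols.toNat 0
  (PySem.List.enumerate grid 0).map (fun rc =>
    let r := rc.1
    let row := rc.2
    let above := if 0 < r then PySem.List.pyGetD h (r - 1) [] else zero
    let below := if r + 1 < PySem.List.len grid then PySem.List.pyGetD h (r + 1) [] else zero
    let hr := PySem.List.pyGetD h r []
    (PySem.List.pyRange 0 cols 1).map (fun c =>
      if PySem.List.pyGetD row c "" = "-" then
        PySem.Int.toStr (PySem.List.pyGetD above c 0 + PySem.List.pyGetD hr c 0 +
          PySem.List.pyGetD below c 0)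
      else
        PySem.List.pyGetD row c ""))

-- ===== PRECONDITION & SPEC =====
-- Pre_ excludes exactly the inputs on which the Python A raises IndexError: the empty
-- grid (grid[0]) and grids with a row shorter than len(grid[0]) (grid[row][column]).
def Pre_construct_grid (grid : List (List String)) : Prop :=
  grid ≠ [] ∧ ∀ row ∈ grid, (grid.headD []).length ≤ row.length
instance (grid : List (List String)) : Decidable (Pre_construct_grid grid) := by
  unfold Pre_construct_grid; infer_instance

def pvWitness_construct_grid : List (List String) := [["-", "#"], ["-", "-"]]

def Spec_construct_grid (grid : List (List String)) (out : List (List String)) : Prop :=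
  out = construct_grid_alt grid
instance (grid : List (List String)) (out : List (List String)) :
    Decidable (Spec_construct_grid grid out) := by unfold Spec_construct_grid; infer_instance

-- ===== CLAIM (what is proved, stated in full; the proofs are below) =====
def Claim_equal_construct_grid : Prop :=
  ∀ (grid : List (List String)), Dom_construct_grid grid → Pre_construct_grid grid →
    Spec_construct_grid grid (construct_grid grid)

-- ===== LEMMAS AND PROOFS =====

-- mine indicator of cell (i, j): 1 iff (i, j) is inside the rows × cols box and holds '#'
def pvG (grid : List (List String)) (i j : Int) : Int :=
  if 0 ≤ i ∧ i < PySem.List.len grid ∧ 0 ≤ j ∧ j < pvCols grid ∧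
      PySem.List.pyGetD (PySem.List.pyGetD grid i []) j "" = "#" then 1 else 0

-- horizontal window of three indicators at row i around column c
def pvRowWin (grid : List (List String)) (i c : Int) : Int :=
  pvG grid i (c - 1) + pvG grid i c + pvG grid i (c + 1)

theorem pvG_zero (grid : List (List String)) (i j : Int)
    (h : i < 0 ∨ PySem.List.len grid ≤ i ∨ j < 0 ∨ pvCols grid ≤ j) :
    pvG grid i j = 0 := by
  rw [pvG, if_neg]; rintro ⟨a, b, c, d, _⟩; omega

theorem pvG_eq (grid : List (List String)) (i j : Int)
    (hi0 : 0 ≤ i) (hir : i < PySem.List.len grid)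
    (hj0 : 0 ≤ j) (hjc : j < pvCols grid) :
    pvG grid i j
      = if PySem.List.pyGetD (PySem.List.pyGetD grid i []) j "" = "#" then 1 else 0 := by
  rw [pvG]
  by_cases h : PySem.List.pyGetD (PySem.List.pyGetD grid i []) j "" = "#"
  · rw [if_pos ⟨hi0, hir, hj0, hjc, h⟩, if_pos h]
  · rw [if_neg (by rintro ⟨_, _, _, _, hc⟩; exact h hc), if_neg h]

theorem pvRowWin_zero (grid : List (List String)) (i c : Int)
    (h : i < 0 ∨ PySem.List.len grid ≤ i) :
    pvRowWin grid i c = 0 := by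
  rw [pvRowWin, pvG_zero _ _ _ (by tauto), pvG_zero _ _ _ (by tauto),
    pvG_zero _ _ _ (by tauto)]
  norm_num

-- sum of a function over A's clamped window [max 0 (t-1), min n (t+2)) equals the
-- unclamped three-term sum, when the function vanishes outside [0, n)
theorem pvWin (w : Int → Int) (n t : Int) (h0 : 0 ≤ t) (hn : t < n)
    (hz : ∀ i, i < 0 ∨ n ≤ i → w i = 0) :
    ((PySem.List.pyRange (max 0 (t - 1)) (min n (t + 2)) 1).map w).sum
      = w (t - 1) + w t + w (t + 1) := by
  rcases eq_or_lt_of_le h0 with h0' | h0' <;> by_cases hn1 : t + 1 < n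
  · rw [show max 0 (t - 1) = t by omega, show min n (t + 2) = t + 2 by omega,
      PySem.List.pyRange_one_cons (by omega), PySem.List.pyRange_one_cons (by omega),
      PySem.List.pyRange_one_eq_nil (by omega)]
    rw [hz (t - 1) (Or.inl (by omega))]
    simp
  · rw [show max 0 (t - 1) = t by omega, show min n (t + 2) = t + 1 by omega,
      PySem.List.pyRange_one_cons (by omega), PySem.List.pyRange_one_eq_nil (by omega)]
    rw [hz (t - 1) (Or.inl (by omega)), hz (t + 1) (Or.inr (by omega))]
    simp
  · rw [show max 0 (t - 1) = t - 1 by omega, show min n (t + 2) = t + 2 by omega,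
      PySem.List.pyRange_one_cons (by omega), PySem.List.pyRange_one_cons (by omega),
      PySem.List.pyRange_one_cons (by omega), PySem.List.pyRange_one_eq_nil (by omega)]
    rw [show t - 1 + 1 = t by omega]
    simp
    ring
  · rw [show max 0 (t - 1) = t - 1 by omega, show min n (t + 2) = t + 1 by omega,
      PySem.List.pyRange_one_cons (by omega), PySem.List.pyRange_one_cons (by omega),
      PySem.List.pyRange_one_eq_nil (by omega)]
    rw [show t - 1 + 1 = t by omega, hz (t + 1) (Or.inr (by omega))]
    simp

-- A's inner column loop computes the horizontal window sum
theorem pvInner (grid : List (List String)) (i c : Int)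
    (hi0 : 0 ≤ i) (hir : i < PySem.List.len grid)
    (hc0 : 0 ≤ c) (hcc : c < pvCols grid) (a : Int) :
    (PySem.List.pyRange (max 0 (c - 1)) (min (pvCols grid) (c + 2)) 1).foldl
        (fun count j =>
          if PySem.List.pyGetD (PySem.List.pyGetD grid i []) j "" = "#" then count + 1
          else count) a
      = a + pvRowWin grid i c := by
  rw [PySem.List.foldl_congr_mem _ _ (fun count j => count + pvG grid i j) a ?_]
  · rw [PySem.List.foldl_add, pvRowWin,
      pvWin (pvG grid i) (pvCols grid) c hc0 hcc
        (fun j hj => pvG_zero grid i j (by tauto))]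
  · intro acc j hj
    rw [PySem.List.mem_pyRange_one] at hj
    show _ = acc + pvG grid i j
    rw [pvG_eq grid i j hi0 hir (by omega) (by omega)]
    by_cases h : PySem.List.pyGetD (PySem.List.pyGetD grid i []) j "" = "#"
    · rw [if_pos h, if_pos h]
    · rw [if_neg h, if_neg h, add_zero]

-- A's count_adjacent_mines is the 3×3 sum of indicators
theorem pvCount (grid : List (List String)) (r c : Int)
    (hr0 : 0 ≤ r) (hrr : r < PySem.List.len grid)
    (hc0 : 0 ≤ c) (hcc : c < pvCols grid) :
    count_adjacent_mines grid r c
      = pvRowWin grid (r - 1) c + pvRowWin grid r c + pvRowWin grid (r + 1) c := by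
  show (PySem.List.pyRange (max 0 (r - 1)) (min (PySem.List.len grid) (r + 2)) 1).foldl _ 0 = _
  rw [PySem.List.foldl_congr_mem _ _ (fun count i => count + pvRowWin grid i c) 0 ?_]
  · rw [PySem.List.foldl_add,
      pvWin (fun i => pvRowWin grid i c) (PySem.List.len grid) r hr0 hrr
        (fun i hi => pvRowWin_zero grid i c hi)]
    ring
  · intro acc i hi
    rw [PySem.List.mem_pyRange_one] at hi
    exact pvInner grid i c (by omega) (by omega) hc0 hcc acc

-- the entry of B's horizontal-window table is pvRowWin
theorem pvHEntry (grid : List (List String)) (i c : Int)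
    (hi0 : 0 ≤ i) (hir : i < PySem.List.len grid)
    (hc0 : 0 ≤ c) (hcc : c < pvCols grid) :
    PySem.List.pyGetD (PySem.List.pyGetD (pvH grid) i []) c 0 = pvRowWin grid i c := by
  have hlen : (pvH grid).length = grid.length := by simp [pvH, pvMines]
  have hig : i < (PySem.List.len grid : Int) := hir
  rw [PySem.List.len_eq] at hig
  have hrow : PySem.List.pyGetD grid i [] = grid[i.toNat] :=
    PySem.List.pyGetD_eq_getElem grid [] hi0 hig
  rw [PySem.List.pyGetD_eq_getElem (pvH grid) [] hi0 (by rw [hlen]; exact hig)]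
  have hget : (pvH grid)[i.toNat] =
      (PySem.List.pyRange 0 (pvCols grid) 1).map (fun c =>
        (if 0 < c then PySem.List.pyGetD ((pvMines grid)[i.toNat]'(by simp [pvMines]; omega)) (c - 1) 0 else 0) +
          PySem.List.pyGetD ((pvMines grid)[i.toNat]'(by simp [pvMines]; omega)) c 0 +
          (if c + 1 < pvCols grid then PySem.List.pyGetD ((pvMines grid)[i.toNat]'(by simp [pvMines]; omega)) (c + 1) 0 else 0)) := by
    simp [pvH]
  rw [hget, PySem.List.pyGetD_map_pyRange_of_nonneg _ _ _ _ hc0 hcc]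
  have hm : (pvMines grid)[i.toNat]'(by simp [pvMines]; omega) =
      (PySem.List.pyRange 0 (pvCols grid) 1).map (fun j =>
        if PySem.List.pyGetD (grid[i.toNat]'(by omega)) j "" = "#" then 1 else 0) := by
    simp [pvMines]
  have hind : ∀ j : Int, 0 ≤ j → j < pvCols grid →
      PySem.List.pyGetD ((pvMines grid)[i.toNat]'(by simp [pvMines]; omega)) j 0 = pvG grid i j := by
    intro j hj0 hjc
    rw [hm, PySem.List.pyGetD_map_pyRange_of_nonneg _ _ _ _ hj0 hjc,
      pvG_eq grid i j hi0 hir hj0 hjc, hrow]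
  rw [pvRowWin]
  by_cases h1 : 0 < c <;> by_cases h2 : c + 1 < pvCols grid
  · rw [if_pos h1, if_pos h2, hind (c-1) (by omega) (by omega), hind c hc0 hcc,
      hind (c+1) (by omega) h2]
  · rw [if_pos h1, if_neg h2, hind (c-1) (by omega) (by omega), hind c hc0 hcc,
      pvG_zero grid i (c+1) (by omega)]
  · rw [if_neg h1, if_pos h2, hind c hc0 hcc, hind (c+1) (by omega) h2,
      pvG_zero grid i (c-1) (by omega)]
  · rw [if_neg h1, if_neg h2, hind c hc0 hcc,
      pvG_zero grid i (c-1) (by omega), pvG_zero grid i (c+1) (by omega)]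

-- ===== VERDICT (by name: the statement is the Claim_ definition above) =====
theorem construct_grid_spec : Claim_equal_construct_grid := by
  intro grid _ _
  unfold Spec_construct_grid construct_grid construct_grid_alt
  rw [PySem.List.enumerate_eq_map_pyRange grid [], List.map_map]
  refine List.map_congr_left (fun r hr => ?_)
  rw [PySem.List.mem_pyRange_one] at hr
  refine List.map_congr_left (fun c hc => ?_)
  rw [PySem.List.mem_pyRange_one] at hc
  simp only []
  have hrr : r < PySem.List.len grid := hr.2
  have hcc : c < pvCols grid := hc.2
  by_cases h : PySem.List.pyGetD (PySem.List.pyGetD grid r []) c "" = "-"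
  · rw [if_pos h, if_pos h]
    congr 1
    have habove :
        PySem.List.pyGetD
            (if 0 < r then PySem.List.pyGetD (pvH grid) (r - 1) []
             else List.replicate (pvCols grid).toNat 0) c 0
          = pvRowWin grid (r - 1) c := by
      by_cases hr1 : 0 < r
      · rw [if_pos hr1, pvHEntry grid (r - 1) c (by omega) (by omega) hc.1 hcc]
      · rw [if_neg hr1,
          PySem.List.pyGetD_eq_getElem _ _ hc.1
            (by rw [List.length_replicate]; omega),
          List.getElem_replicate, pvRowWin_zero grid (r - 1) c (Or.inl (by omega))]
    have hbelow :
        PySem.List.pyGetD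
            (if r + 1 < PySem.List.len grid then PySem.List.pyGetD (pvH grid) (r + 1) []
             else List.replicate (pvCols grid).toNat 0) c 0
          = pvRowWin grid (r + 1) c := by
      by_cases hr1 : r + 1 < PySem.List.len grid
      · rw [if_pos hr1, pvHEntry grid (r + 1) c (by omega) hr1 hc.1 hcc]
      · rw [if_neg hr1,
          PySem.List.pyGetD_eq_getElem _ _ hc.1
            (by rw [List.length_replicate]; omega),
          List.getElem_replicate, pvRowWin_zero grid (r + 1) c (Or.inr (by omega))]
    rw [habove, hbelow, pvHEntry grid r c hr.1 hrr hc.1 hcc,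
      pvCount grid r c hr.1 hrr hc.1 hcc]
  · rw [if_neg h, if_neg h]
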